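-- pv_equiv track=rewrite | github.com/Yuchen413/AnomalyRuler | majority_smooth.py | cluster_keyword
-- ===== SOURCE A (Python) =====
-- def cluster_keyword(text_lines, anomaly_from_rule):
--     preds = []
--     anomaly_word = []
--     for line in text_lines:
--         found_anomaly = False
--         for anomaly in anomaly_from_rule:
--             if anomaly in line:
--                 found_anomaly = True
--                 anomaly_word.append(anomaly)
--         preds.append(1 if found_anomaly else 0)
--     return preds, anomaly_from_rule, anomaly_word
-- ===== SOURCE B (Python) =====
-- def cluster_keyword(text_lines, anomaly_from_rule):
--     # Transposed traversal: one pass per KEYWORD over all lines (a boolean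
--     # column), columns merged positionally; A scans line-by-line instead.
--     hit = [False] * len(text_lines)
--     words = [[] for _ in text_lines]
--     for a in anomaly_from_rule:
--         col = [a in line for line in text_lines]
--         hit = [h or c for h, c in zip(hit, col)]
--         words = [w + [a] if c else w for w, c in zip(words, col)]
--     preds = [1 if h else 0 for h in hit]
--     anomaly_word = [x for ws in words for x in ws]
--     return preds, anomaly_from_rule, anomaly_word
-- ===== Notes on version B (the rewrite author's own statement) =====
-- stated objective: alternative
-- what changed: Transposes the traversal: instead of A's line-major nested scan with a mutable flag, B makes one pass per keyword building a boolean column over all lines and merges columns positionally with zips, then derives preds and anomaly_word from the merged state; output order is preserved because within a line keywords still appear in rule order.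
import Mathlib
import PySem

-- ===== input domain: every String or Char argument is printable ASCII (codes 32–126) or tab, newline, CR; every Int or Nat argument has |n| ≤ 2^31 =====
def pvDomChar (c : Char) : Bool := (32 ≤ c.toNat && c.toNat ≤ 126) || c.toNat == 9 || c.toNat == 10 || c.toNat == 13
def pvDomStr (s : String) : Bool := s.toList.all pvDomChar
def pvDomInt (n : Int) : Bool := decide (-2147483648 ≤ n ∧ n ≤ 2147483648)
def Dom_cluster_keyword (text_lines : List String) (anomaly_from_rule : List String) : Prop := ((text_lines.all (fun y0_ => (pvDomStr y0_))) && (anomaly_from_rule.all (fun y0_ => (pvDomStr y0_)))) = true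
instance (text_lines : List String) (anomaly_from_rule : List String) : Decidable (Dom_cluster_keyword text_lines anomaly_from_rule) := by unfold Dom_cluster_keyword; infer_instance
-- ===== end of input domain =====

-- B transposes the traversal (one boolean column per keyword, columns merged positionally)
-- instead of A's line-major nested scan with a mutable flag (objective: alternative).

-- ===== PORT A =====
def cluster_keyword (text_lines : List String) (anomaly_from_rule : List String) : List Int × List String × List String :=
  -- preds = []; anomaly_word = []; for line in text_lines: …
  let st := text_lines.foldl (fun (st : List Int × List String) line =>
    -- found_anomaly = False; for anomaly in anomaly_from_rule: if anomaly in line: …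
    let inner := anomaly_from_rule.foldl
      (fun (st2 : Bool × List String) anomaly =>
        if PySem.Str.isIn anomaly line then (true, st2.2 ++ [anomaly]) else st2)
      (false, st.2)
    (st.1 ++ [if inner.1 then (1 : Int) else 0], inner.2)) ([], [])
  (st.1, anomaly_from_rule, st.2)

-- ===== PORT B =====
def cluster_keyword_alt (text_lines : List String) (anomaly_from_rule : List String) : List Int × List String × List String :=
  -- hit = [False]*len(text_lines); words = [[] for _ in text_lines]
  let st := anomaly_from_rule.foldl
    (fun (st : List Bool × List (List String)) a =>
      -- col = [a in line for line in text_lines]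
      let col := text_lines.map (fun line => PySem.Str.isIn a line)
      -- hit = [h or c ...]; words = [w + [a] if c else w ...]
      (List.zipWith (fun h c => h || c) st.1 col,
       List.zipWith (fun w c => if c then w ++ [a] else w) st.2 col))
    (text_lines.map (fun _ => false), text_lines.map (fun _ => ([] : List String)))
  (st.1.map (fun h => if h then (1 : Int) else 0), anomaly_from_rule, st.2.flatMap id)

-- ===== PRECONDITION & SPEC =====
def Spec_cluster_keyword (text_lines : List String) (anomaly_from_rule : List String) (out : List Int × List String × List String) : Prop := out = cluster_keyword_alt text_lines anomaly_from_rule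
instance (text_lines : List String) (anomaly_from_rule : List String) (out : List Int × List String × List String) : Decidable (Spec_cluster_keyword text_lines anomaly_from_rule out) := by unfold Spec_cluster_keyword; infer_instance

-- ===== CLAIM (what is proved, stated in full; the proofs are below) =====
def Claim_equal_cluster_keyword : Prop := ∀ (text_lines : List String) (anomaly_from_rule : List String), Dom_cluster_keyword text_lines anomaly_from_rule → Spec_cluster_keyword text_lines anomaly_from_rule (cluster_keyword text_lines anomaly_from_rule)

-- ===== LEMMAS AND PROOFS =====

-- zipping two maps of the same list is a single map
theorem pv_zipWith_map_same {α β γ δ : Type} (f : β → γ → δ) (g : α → β) (h : α → γ) (l : List α) :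
    List.zipWith f (l.map g) (l.map h) = l.map (fun x => f (g x) (h x)) := by
  induction l with
  | nil => rfl
  | cons x xs ih => simp [ih]

-- A's inner keyword loop = (flag ∨ some keyword matches, accumulator ++ the matching keywords in order)
theorem pv_inner_eq (line : String) (rl : List String) (f0 : Bool) (aw0 : List String) :
    rl.foldl (fun (st2 : Bool × List String) anomaly =>
        if PySem.Str.isIn anomaly line then (true, st2.2 ++ [anomaly]) else st2) (f0, aw0)
    = (f0 || rl.any (fun a => PySem.Str.isIn a line),
       aw0 ++ rl.filter (fun a => PySem.Str.isIn a line)) := by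
  induction rl generalizing f0 aw0 with
  | nil => simp
  | cons a rest ih =>
    simp only [List.foldl_cons, List.any_cons, List.filter_cons]
    by_cases h : PySem.Str.isIn a line = true
    · rw [if_pos h, ih, h]
      simp
    · rw [if_neg h, ih]
      rw [Bool.not_eq_true] at h
      simp at h
      simp [h]

-- A's outer loop accumulates the per-line any-flags and the flattened per-line match lists
theorem pv_outer_eq (rl : List String) (tl : List String) (preds0 : List Int) (aw0 : List String) :
    tl.foldl (fun (st : List Int × List String) line =>
        let inner := rl.foldl
          (fun (st2 : Bool × List String) anomaly =>
            if PySem.Str.isIn anomaly line then (true, st2.2 ++ [anomaly]) else st2)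
          (false, st.2)
        (st.1 ++ [if inner.1 then (1 : Int) else 0], inner.2)) (preds0, aw0)
    = (preds0 ++ tl.map (fun line =>
         if rl.any (fun a => PySem.Str.isIn a line) then (1 : Int) else 0),
       aw0 ++ tl.flatMap (fun line => rl.filter (fun a => PySem.Str.isIn a line))) := by
  induction tl generalizing preds0 aw0 with
  | nil => simp
  | cons line rest ih =>
    simp only [List.foldl_cons]
    rw [pv_inner_eq]
    simp only [Bool.false_or]
    rw [ih]
    simp only [List.map_cons, List.flatMap_cons, List.append_assoc, List.cons_append, List.nil_append]

-- B's keyword-major fold maintains, position-wise over the lines, the any-flag and the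
-- rule-ordered match list for the keywords processed so far
theorem pv_alt_fold_eq (tl : List String) (rl : List String) (rs : List String) :
    rl.foldl
      (fun (st : List Bool × List (List String)) a =>
        let col := tl.map (fun line => PySem.Str.isIn a line)
        (List.zipWith (fun h c => h || c) st.1 col,
         List.zipWith (fun w c => if c then w ++ [a] else w) st.2 col))
      (tl.map (fun line => rs.any (fun a => PySem.Str.isIn a line)),
       tl.map (fun line => rs.filter (fun a => PySem.Str.isIn a line)))
    = (tl.map (fun line => (rs ++ rl).any (fun a => PySem.Str.isIn a line)),
       tl.map (fun line => (rs ++ rl).filter (fun a => PySem.Str.isIn a line))) := by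
  induction rl generalizing rs with
  | nil => simp
  | cons a rest ih =>
    simp only [List.foldl_cons]
    rw [pv_zipWith_map_same, pv_zipWith_map_same]
    have h1 : (tl.map fun line => rs.any (fun a => PySem.Str.isIn a line) || PySem.Str.isIn a line)
        = tl.map (fun line => (rs ++ [a]).any (fun a => PySem.Str.isIn a line)) := by
      simp
    have h2 : (tl.map fun line =>
          if PySem.Str.isIn a line then rs.filter (fun a => PySem.Str.isIn a line) ++ [a]
          else rs.filter (fun a => PySem.Str.isIn a line))
        = tl.map (fun line => (rs ++ [a]).filter (fun a => PySem.Str.isIn a line)) := by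
      apply List.map_congr_left
      intro line _
      rw [List.filter_append]
      simp only [List.filter_cons, List.filter_nil]
      by_cases h : PySem.Str.isIn a line = true
      · rw [if_pos h, if_pos h]
      · rw [if_neg h, if_neg h, List.append_nil]
    rw [h1, h2, ih]
    simp

-- ===== VERDICT (by name: the statement is the Claim_ definition above) =====
theorem cluster_keyword_spec : Claim_equal_cluster_keyword := by
  intro tl rl _
  unfold Spec_cluster_keyword cluster_keyword cluster_keyword_alt
  rw [pv_outer_eq]
  have h0 : (tl.map (fun _ => false), tl.map (fun _ => ([] : List String)))
      = (tl.map (fun line => ([] : List String).any (fun a => PySem.Str.isIn a line)),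
         tl.map (fun line => ([] : List String).filter (fun a => PySem.Str.isIn a line))) := by
    simp
  rw [h0, pv_alt_fold_eq]
  simp [List.flatMap_def, Function.comp_def]
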